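-- pv_equiv track=rewrite | github.com/SethBurkart123/Covalt | backend/services/flow_executor.py | _upstream_closure
-- ===== SOURCE A (Python) =====
-- def _upstream_closure(edges: list[dict], seed_node_ids: set[str]) -> set[str]:
--     if not seed_node_ids:
--         return set()
--
--     reverse_adjacency: dict[str, list[str]] = {}
--     for edge in edges:
--         source = edge.get("source")
--         target = edge.get("target")
--         if not source or not target:
--             continue
--         reverse_adjacency.setdefault(target, []).append(source)
--
--     visited: set[str] = set()
--     queue: list[str] = sorted(seed_node_ids)
--
--     while queue:
--         node_id = queue.pop(0)
--         if node_id in visited: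
--             continue
--         visited.add(node_id)
--
--         for source_id in reverse_adjacency.get(node_id, []):
--             if source_id not in visited:
--                 queue.append(source_id)
--
--     return visited
-- ===== SOURCE B (Python) =====
-- def _upstream_closure(edges: list[dict], seed_node_ids: set[str]) -> set[str]:
--     visited: set[str] = set()
--     queue: list[str] = sorted(seed_node_ids)
--     for node_id in queue:  # queue grows while we iterate over it
--         if node_id in visited:
--             continue
--         visited.add(node_id)
--         for edge in edges:
--             source = edge.get("source")
--             target = edge.get("target")
--             if source and target and target == node_id and source not in visited:
--                 queue.append(source)
--     return visited
-- ===== Notes on version B (the rewrite author's own statement) =====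
-- stated objective: simpler
-- what changed: B drops the reverse-adjacency dict and the O(n) pop(0) queue entirely: it iterates over the growing queue list in place and discovers each node's predecessors by scanning the edge list directly at visit time.
import Mathlib
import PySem

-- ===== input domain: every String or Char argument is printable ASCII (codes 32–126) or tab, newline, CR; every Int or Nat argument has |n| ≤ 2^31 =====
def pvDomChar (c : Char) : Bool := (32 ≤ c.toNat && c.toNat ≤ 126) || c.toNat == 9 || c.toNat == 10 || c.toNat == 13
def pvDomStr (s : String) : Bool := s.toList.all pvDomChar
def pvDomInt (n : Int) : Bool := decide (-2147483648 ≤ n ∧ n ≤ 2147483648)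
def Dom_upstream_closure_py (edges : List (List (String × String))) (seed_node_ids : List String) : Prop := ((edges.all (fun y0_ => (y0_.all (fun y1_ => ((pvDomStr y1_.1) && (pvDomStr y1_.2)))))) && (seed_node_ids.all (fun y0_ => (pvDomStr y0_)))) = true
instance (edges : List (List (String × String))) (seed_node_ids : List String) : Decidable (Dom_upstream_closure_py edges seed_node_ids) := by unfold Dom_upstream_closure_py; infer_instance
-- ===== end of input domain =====

-- B replaces A's prebuilt reverse-adjacency dict and pop(0) queue by iterating the growing
-- queue in place and scanning the edge list at each visit; objective: simpler (not faster).
-- Both loops always pop one queue element per iteration, so the same (provably sufficient)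
-- fuel bound makes each port total; fuel exhaustion returns the visited set as-is.

-- ===== PORT A =====
def pvLoopA (radj : PySem.Dict String (List String)) : Nat → List String → PySem.Set String → List String
  | 0, _, visited => visited
  | _ + 1, [], visited => visited
  | fuel + 1, node_id :: queue, visited =>
      if PySem.Set.contains visited node_id then
        pvLoopA radj fuel queue visited
      else
        let visited' := PySem.Set.add visited node_id
        let queue' := (radj.getD node_id []).foldl
          (fun q source_id => if PySem.Set.contains visited' source_id then q else q ++ [source_id]) queue
        pvLoopA radj fuel queue' visited'

def upstream_closure_py (edges : List (List (String × String))) (seed_node_ids : List String) : List String :=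
  if seed_node_ids = [] then [] else
  let radj : PySem.Dict String (List String) := edges.foldl
    (fun d edge =>
      match (PySem.Dict.mk edge).get? "source", (PySem.Dict.mk edge).get? "target" with
      | some source, some target =>
          if source = "" || target = "" then d
          else d.modify target [] (fun l => l ++ [source])   -- setdefault(target, []).append(source)
      | _, _ => d)
    PySem.Dict.empty
  pvLoopA radj (seed_node_ids.length + (seed_node_ids.length + edges.length) * edges.length + 1)
    (PySem.List.sorted seed_node_ids (fun x => x) false) PySem.Set.empty

-- ===== PORT B =====
def pvLoopB (edges : List (List (String × String))) : Nat → List String → PySem.Set String → List String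
  | fuel, pending, visited =>
    match fuel, pending with
    | fuel' + 1, node_id :: pending' =>
        if PySem.Set.contains visited node_id then
          pvLoopB edges fuel' pending' visited
        else
          let visited' := PySem.Set.add visited node_id
          let pending'' := edges.foldl
            (fun q edge =>
              match (PySem.Dict.mk edge).get? "source" with
              | none => q
              | some source =>
                match (PySem.Dict.mk edge).get? "target" with
                | none => q
                | some target =>
                  if source ≠ "" && target ≠ "" && target = node_id && !(PySem.Set.contains visited' source)
                  then q ++ [source] else q)
            pending'
          pvLoopB edges fuel' pending'' visited'
    | _, _ => visited

def upstream_closure_py_alt (edges : List (List (String × String))) (seed_node_ids : List String) : List String :=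
  pvLoopB edges (seed_node_ids.length + (seed_node_ids.length + edges.length) * edges.length + 1)
    (PySem.List.sorted seed_node_ids (fun x => x) false) PySem.Set.empty

-- ===== PRECONDITION & SPEC =====
def Spec_upstream_closure_py (edges : List (List (String × String))) (seed_node_ids : List String) (out : List String) : Prop := out = upstream_closure_py_alt edges seed_node_ids
instance (edges : List (List (String × String))) (seed_node_ids : List String) (out : List String) : Decidable (Spec_upstream_closure_py edges seed_node_ids out) := by unfold Spec_upstream_closure_py; infer_instance

-- ===== CLAIM (what is proved, stated in full; the proofs are below) =====
def Claim_equal_upstream_closure_py : Prop := ∀ (edges : List (List (String × String))) (seed_node_ids : List String), Dom_upstream_closure_py edges seed_node_ids → Spec_upstream_closure_py edges seed_node_ids (upstream_closure_py edges seed_node_ids)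

-- ===== LEMMAS AND PROOFS =====

-- the predecessors of x contributed by the (valid) edges, in edge order
def pvChildren (edges : List (List (String × String))) (x : String) : List String :=
  edges.filterMap (fun edge =>
    match (PySem.Dict.mk edge).get? "source", (PySem.Dict.mk edge).get? "target" with
    | some s, some t => if s ≠ "" && t ≠ "" && t = x then some s else none
    | _, _ => none)

-- A's reverse-adjacency lookup yields exactly pvChildren
theorem pvRadj_getD (edges : List (List (String × String))) (d : PySem.Dict String (List String)) (x : String) :
    (edges.foldl
      (fun d edge =>
        match (PySem.Dict.mk edge).get? "source", (PySem.Dict.mk edge).get? "target" with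
        | some source, some target =>
            if source = "" || target = "" then d
            else d.modify target [] (fun l => l ++ [source])
        | _, _ => d)
      d).getD x [] = d.getD x [] ++ pvChildren edges x := by
  induction edges generalizing d with
  | nil => simp [pvChildren]
  | cons e es ih =>
      rw [List.foldl_cons]
      cases hs : (PySem.Dict.mk e).get? "source" with
      | none =>
          simp only [hs]
          rw [ih]
          simp [pvChildren, List.filterMap_cons, hs]
      | some s =>
        cases ht : (PySem.Dict.mk e).get? "target" with
        | none =>
            simp only [hs, ht]
            rw [ih]
            simp [pvChildren, List.filterMap_cons, hs, ht]
        | some t =>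
          simp only [hs, ht]
          by_cases hz : s = "" ∨ t = ""
          · have hg : (s = "" || t = "") = true := by rcases hz with h | h <;> simp [h]
            rw [if_pos hg, ih]
            have hch : pvChildren (e :: es) x = pvChildren es x := by
              rcases hz with h | h <;> simp [pvChildren, List.filterMap_cons, hs, ht, h]
            rw [hch]
          · rw [not_or] at hz
            have hg : ¬ ((s = "" || t = "") = true) := by simp [hz.1, hz.2]
            rw [if_neg hg, ih]
            by_cases htx : t = x
            · subst htx
              simp [pvChildren, List.filterMap_cons, hs, ht, hz.1, hz.2,
                PySem.Dict.getD_modify_self, List.append_assoc]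
            · have hxt : ¬ x = t := fun hh => htx hh.symm
              simp [pvChildren, List.filterMap_cons, hs, ht, htx, hxt, hz.1, hz.2,
                PySem.Dict.getD_modify]

-- A's inner append loop over a child list
theorem pvFoldA (v : PySem.Set String) (q cs : List String) :
    cs.foldl (fun q s => if PySem.Set.contains v s then q else q ++ [s]) q
      = q ++ cs.filter (fun s => !(PySem.Set.contains v s)) := by
  induction cs generalizing q with
  | nil => simp
  | cons c cs ih =>
      rw [List.foldl_cons]
      by_cases h : c ∈ v
      · have hc : PySem.Set.contains v c = true := by simp [h]
        rw [if_pos hc, ih]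
        simp [List.filter_cons, h]
      · have hc : ¬ (PySem.Set.contains v c = true) := by simp [h]
        rw [if_neg hc, ih]
        simp [List.filter_cons, h, List.append_assoc]

-- B's inner edge scan equals A's inner loop over pvChildren
theorem pvFoldB (edges : List (List (String × String))) (v : PySem.Set String) (x : String) (q : List String) :
    edges.foldl
      (fun q edge =>
        match (PySem.Dict.mk edge).get? "source" with
        | none => q
        | some source =>
          match (PySem.Dict.mk edge).get? "target" with
          | none => q
          | some target =>
            if source ≠ "" && target ≠ "" && target = x && !(PySem.Set.contains v source)
            then q ++ [source] else q)
      q = q ++ (pvChildren edges x).filter (fun s => !(PySem.Set.contains v s)) := by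
  induction edges generalizing q with
  | nil => simp [pvChildren]
  | cons e es ih =>
      rw [List.foldl_cons]
      cases hs : (PySem.Dict.mk e).get? "source" with
      | none =>
          simp only [hs]
          rw [ih]
          simp [pvChildren, List.filterMap_cons, hs]
      | some s =>
        cases ht : (PySem.Dict.mk e).get? "target" with
        | none =>
            simp only [hs, ht]
            rw [ih]
            simp [pvChildren, List.filterMap_cons, hs, ht]
        | some t =>
          simp only [hs, ht]
          by_cases h1 : s = ""
          · have hg : ¬ ((s ≠ "" && t ≠ "" && t = x && !(PySem.Set.contains v s)) = true) := by
              simp [h1]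
            rw [if_neg hg, ih]
            have hch : pvChildren (e :: es) x = pvChildren es x := by
              simp [pvChildren, List.filterMap_cons, hs, ht, h1]
            rw [hch]
          · by_cases h2 : t = ""
            · have hg : ¬ ((s ≠ "" && t ≠ "" && t = x && !(PySem.Set.contains v s)) = true) := by
                simp [h2]
              rw [if_neg hg, ih]
              have hch : pvChildren (e :: es) x = pvChildren es x := by
                simp [pvChildren, List.filterMap_cons, hs, ht, h2]
              rw [hch]
            · by_cases h3 : t = x
              · subst h3
                have hch : pvChildren (e :: es) t = s :: pvChildren es t := by
                  simp [pvChildren, List.filterMap_cons, hs, ht, h1, h2]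
                by_cases h4 : s ∈ v
                · have hg : ¬ ((s ≠ "" && t ≠ "" && t = t && !(PySem.Set.contains v s)) = true) := by
                    simp [h4]
                  rw [if_neg hg, ih, hch]
                  simp [List.filter_cons, h4]
                · have hg : (s ≠ "" && t ≠ "" && t = t && !(PySem.Set.contains v s)) = true := by
                    simp [h1, h2, h4]
                  rw [if_pos hg, ih, hch]
                  simp [List.filter_cons, h4, List.append_assoc]
              · have hg : ¬ ((s ≠ "" && t ≠ "" && t = x && !(PySem.Set.contains v s)) = true) := by
                  simp [h3]
                rw [if_neg hg, ih]
                have hch : pvChildren (e :: es) x = pvChildren es x := by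
                  simp [pvChildren, List.filterMap_cons, hs, ht, h3]
                rw [hch]

-- lockstep: the two loops agree for every fuel, queue and visited set
theorem pvLoop_eq (edges : List (List (String × String))) (fuel : Nat) (q : List String) (v : PySem.Set String) :
    pvLoopA (edges.foldl
      (fun d edge =>
        match (PySem.Dict.mk edge).get? "source", (PySem.Dict.mk edge).get? "target" with
        | some source, some target =>
            if source = "" || target = "" then d
            else d.modify target [] (fun l => l ++ [source])
        | _, _ => d)
      PySem.Dict.empty) fuel q v = pvLoopB edges fuel q v := by
  induction fuel generalizing q v with
  | zero => rfl
  | succ fuel ih =>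
      cases q with
      | nil => rfl
      | cons x q =>
          by_cases h : x ∈ v
          · have hc : PySem.Set.contains v x = true := by simp [h]
            simp only [pvLoopA, pvLoopB]
            rw [if_pos hc, if_pos hc]
            exact ih q v
          · have hc : PySem.Set.contains v x = false := by simp [h]
            simp only [pvLoopA, pvLoopB, hc, Bool.false_eq_true, if_false]
            rw [pvRadj_getD, PySem.Dict.getD_empty, List.nil_append, pvFoldA, pvFoldB, ih]

theorem pvLoopB_nil (edges : List (List (String × String))) (fuel : Nat) (v : PySem.Set String) :
    pvLoopB edges fuel [] v = v := by cases fuel <;> rfl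

-- ===== VERDICT (by name: the statement is the Claim_ definition above) =====
theorem upstream_closure_py_spec : Claim_equal_upstream_closure_py := by
  intro edges seeds _
  show upstream_closure_py edges seeds = upstream_closure_py_alt edges seeds
  unfold upstream_closure_py upstream_closure_py_alt
  by_cases h : seeds = []
  · subst h
    simp [pvLoopB_nil, PySem.List.sorted]
  · simp only [if_neg h]
    exact pvLoop_eq edges _ _ _
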